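-- pv_equiv track=rewrite | github.com/declancw0214/RBE470x-Project | team8/testcharacter.py | blast_radius
-- ===== SOURCE A (Python) =====
-- def blast_radius(bomb_pos, move):
--     if(not bomb_pos):
--         return False
--     for dx in range(-5, 5, 1):
--         radius = (bomb_pos[0] + dx, bomb_pos[1])
--         if ((move[0] == radius[0]) & (move[1] == radius[1])):
--             return True
--     for dy in range(-5, 5, 1):
--         radius = (bomb_pos[0], bomb_pos[1] + dy)
--         if ((move[0] == radius[0]) & (move[1] == radius[1])):
--             return True
--     return False
-- ===== SOURCE B (Python) =====
-- def blast_radius(bomb_pos, move):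
--     if not bomb_pos:
--         return False
--     return ((move[1] == bomb_pos[1] and -5 <= move[0] - bomb_pos[0] <= 4)
--             or (move[0] == bomb_pos[0] and -5 <= move[1] - bomb_pos[1] <= 4))
-- ===== Notes on version B (the rewrite author's own statement) =====
-- stated objective: simpler
-- what changed: Replaced the two 10-iteration offset-scanning loops with a single closed-form boolean test of cross membership (same row/column with offset in [-5,4]).
import Mathlib
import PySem

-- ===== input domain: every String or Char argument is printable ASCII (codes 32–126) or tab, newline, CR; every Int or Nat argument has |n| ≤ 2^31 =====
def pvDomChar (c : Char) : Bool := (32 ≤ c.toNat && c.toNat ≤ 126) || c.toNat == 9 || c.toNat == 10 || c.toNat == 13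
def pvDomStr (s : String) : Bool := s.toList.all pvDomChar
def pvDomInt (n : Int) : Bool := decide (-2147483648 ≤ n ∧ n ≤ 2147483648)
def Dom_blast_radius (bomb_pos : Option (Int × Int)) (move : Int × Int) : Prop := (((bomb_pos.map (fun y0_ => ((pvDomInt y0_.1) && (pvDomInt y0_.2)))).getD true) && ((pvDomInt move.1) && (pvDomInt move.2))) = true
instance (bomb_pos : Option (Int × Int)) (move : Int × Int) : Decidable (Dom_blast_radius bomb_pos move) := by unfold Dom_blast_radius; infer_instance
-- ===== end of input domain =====

-- ===== PORT A =====
-- B replaces A's two offset-scanning loops with one closed-form boolean; return values agree everywhere.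
def blast_radius (bomb_pos : Option (Int × Int)) (move : Int × Int) : Bool :=
  match bomb_pos with
  | none => false
  | some bp =>
    -- for dx in range(-5, 5): if move == (bp.1+dx, bp.2): return True
    if (PySem.List.pyRange (-5) 5 1).any (fun dx =>
        (decide (move.1 = bp.1 + dx)) && (decide (move.2 = bp.2))) then true
    -- for dy in range(-5, 5): if move == (bp.1, bp.2+dy): return True
    else if (PySem.List.pyRange (-5) 5 1).any (fun dy =>
        (decide (move.1 = bp.1)) && (decide (move.2 = bp.2 + dy))) then true
    else false

-- ===== PORT B =====
def blast_radius_alt (bomb_pos : Option (Int × Int)) (move : Int × Int) : Bool :=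
  match bomb_pos with
  | none => false
  | some bp =>
    (decide (move.2 = bp.2) && decide (-5 ≤ move.1 - bp.1) && decide (move.1 - bp.1 ≤ 4))
    || (decide (move.1 = bp.1) && decide (-5 ≤ move.2 - bp.2) && decide (move.2 - bp.2 ≤ 4))

-- ===== PRECONDITION & SPEC =====
def Spec_blast_radius (bomb_pos : Option (Int × Int)) (move : Int × Int) (out : Bool) : Prop := out = blast_radius_alt bomb_pos move
instance (bomb_pos : Option (Int × Int)) (move : Int × Int) (out : Bool) : Decidable (Spec_blast_radius bomb_pos move out) := by unfold Spec_blast_radius; infer_instance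

-- ===== CLAIM (what is proved, stated in full; the proofs are below) =====
def Claim_equal_blast_radius : Prop := ∀ (bomb_pos : Option (Int × Int)) (move : Int × Int), Dom_blast_radius bomb_pos move → Spec_blast_radius bomb_pos move (blast_radius bomb_pos move)

-- ===== LEMMAS AND PROOFS =====

-- ===== VERDICT (by name: the statement is the Claim_ definition above) =====
theorem blast_radius_spec : Claim_equal_blast_radius := by
  intro bomb_pos move _
  unfold Spec_blast_radius blast_radius blast_radius_alt
  cases bomb_pos with
  | none => rfl
  | some bp =>
    obtain ⟨bx, by'⟩ := bp
    obtain ⟨mx, my⟩ := move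
    simp only [PySem.List.pyRange]
    norm_num [List.any_eq_true]
    simp only [← Bool.decide_and, ← Bool.decide_or, decide_eq_decide]
    constructor
    · rintro (⟨dx, hdx, h1, h2⟩ | ⟨dx, hdx, h1, h2⟩)
      · exact Or.inl ⟨⟨h2, by omega⟩, by omega⟩
      · exact Or.inr ⟨⟨h1, by omega⟩, by omega⟩
    · rintro (⟨⟨h2, h3⟩, h4⟩ | ⟨⟨h1, h3⟩, h4⟩)
      · exact Or.inl ⟨(mx - bx + 5).toNat, by omega, by omega, h2⟩
      · exact Or.inr ⟨(my - by' + 5).toNat, by omega, h1, by omega⟩
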